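-- pv_equiv track=rewrite | github.com/FEniCS/ffcx | ffcx/ir/dof_permutations.py | permute_ncf_face
-- ===== SOURCE A (Python) =====
-- import math
--
-- def permute_ncf_face(dofs_in, sub_block_size, reverse_blocks=False):
--     """Permute the dofs on a quadrilateral."""
--     n = len(dofs_in) // sub_block_size
--     s = math.floor(math.sqrt(n))
--     assert s ** 2 == n
--
--     if s == 1:
--         simple_dofs = [0]
--     elif s == 2:
--         simple_dofs = [0, 1, 2, 3]
--     else:
--         # TODO: fix higher order NCF spaces
--         raise RuntimeError("NCF spaces of order > 2 not yet supported")
--         simple_dofs = []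
--         for i in [0] + list(range(2 * s, n, s)) + [s]:
--             simple_dofs += [i] + list(range(i + 2, i + s)) + [i + 1]
--     dofs = []
--     for d in simple_dofs:
--         dofs += [dofs_in[d * sub_block_size + k] for k in range(sub_block_size)]
--     assert len(dofs) == len(dofs_in)
--
--     return [quadrilateral_rotation(dofs, sub_block_size),
--             quadrilateral_reflection(dofs, sub_block_size, reverse_blocks)]
--
-- def quadrilateral_rotation(dofs, sub_block_size=1, reverse_blocks=False):
--     """Rotate the dofs in a quadrilateral."""
--     n = len(dofs) // sub_block_size
--     s = math.floor(math.sqrt(n))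
--     assert s ** 2 == n
--
--     perm = []
--     for st in range(n - s, n):
--         for dof in range(st, -1, -s):
--             if reverse_blocks:
--                 perm += [dof * sub_block_size + k for k in range(sub_block_size)][::-1]
--             else:
--                 perm += [dof * sub_block_size + k for k in range(sub_block_size)]
--     assert len(perm) == len(dofs)
--
--     return [dofs[i] for i in perm]
--
-- def quadrilateral_reflection(dofs, sub_block_size=1, reverse_blocks=False):
--     """Reflect the dofs in a quadrilateral."""
--     n = len(dofs) // sub_block_size
--     s = math.floor(math.sqrt(n))
--     assert s ** 2 == n
--     if s == 0:
--         return dofs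
--
--     perm = []
--     for st in range(s):
--         for dof in range(st, n, s):
--             if reverse_blocks:
--                 perm += [dof * sub_block_size + k for k in range(sub_block_size)][::-1]
--             else:
--                 perm += [dof * sub_block_size + k for k in range(sub_block_size)]
--     assert len(perm) == len(dofs)
--
--     return [dofs[i] for i in perm]
-- ===== SOURCE B (Python) =====
-- def permute_ncf_face(dofs_in, sub_block_size, reverse_blocks=False):
--     """Permute the dofs on a quadrilateral (order 1 and 2 NCF spaces)."""
--     n = len(dofs_in) // sub_block_size
--     if n == 1:
--         rot_order, refl_order = [0], [0]
--     elif n == 4: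
--         rot_order, refl_order = [2, 0, 3, 1], [0, 2, 1, 3]
--     else:
--         raise RuntimeError("NCF spaces of order > 2 not yet supported")
--     blocks = [dofs_in[i * sub_block_size:(i + 1) * sub_block_size] for i in range(n)]
--     rotation = [x for b in rot_order for x in blocks[b]]
--     reflection = [x for b in refl_order
--                   for x in (blocks[b][::-1] if reverse_blocks else blocks[b])]
--     return [rotation, reflection]
-- ===== Notes on version B (the rewrite author's own statement) =====
-- stated objective: simpler
-- what changed: Replaces A's three helper functions with their arithmetic index-permutation loops (floor-sqrt, reordering pass, nested stride ranges) by one function that slices the input into n blocks once and reads them out through two fixed block-order tables ([2,0,3,1] / [0,2,1,3]), since only orders 1 and 2 (n=1 or 4) are supported anyway.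
import Mathlib
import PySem

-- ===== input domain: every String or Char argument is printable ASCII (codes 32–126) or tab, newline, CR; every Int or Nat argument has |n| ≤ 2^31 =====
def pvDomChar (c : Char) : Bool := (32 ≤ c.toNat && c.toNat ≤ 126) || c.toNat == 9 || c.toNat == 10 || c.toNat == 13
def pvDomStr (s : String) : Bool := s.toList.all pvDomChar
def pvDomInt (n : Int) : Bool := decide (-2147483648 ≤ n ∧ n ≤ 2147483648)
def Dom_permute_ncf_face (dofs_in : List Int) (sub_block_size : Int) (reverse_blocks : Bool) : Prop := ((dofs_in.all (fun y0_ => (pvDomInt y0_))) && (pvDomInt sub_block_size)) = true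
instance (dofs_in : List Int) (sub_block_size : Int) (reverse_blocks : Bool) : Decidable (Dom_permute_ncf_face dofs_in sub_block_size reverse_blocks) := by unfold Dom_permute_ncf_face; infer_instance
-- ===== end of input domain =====

-- B replaces A's arithmetic index-permutation loops by slicing the input into
-- blocks read through two fixed block-order tables; objective: simpler.

-- ===== PORT A =====
-- A's `[dof * sub_block_size + k for k in range(sub_block_size)]`
def pvBlockIdx (sub_block_size : Int) (dof : Int) : List Int :=
  (PySem.List.pyRange 0 sub_block_size 1).map (fun k => dof * sub_block_size + k)

-- math.floor(math.sqrt(n)): exact integer sqrt at the magnitudes Dom admits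
-- (negative n makes math.sqrt raise — outside Pre_; toNat makes the port total there).
def pvFloorSqrt (n : Int) : Int := ((Int.toNat n).sqrt : Int)

def quadrilateral_rotation (dofs : List Int) (sub_block_size : Int) (reverse_blocks : Bool) : List Int :=
  let n := PySem.Int.floordiv (PySem.List.len dofs) sub_block_size
  let s := pvFloorSqrt n
  -- assert s ** 2 == n : AssertionError outside Pre_
  let perm := (PySem.List.pyRange (n - s) n 1).foldl (fun acc st =>
    (PySem.List.pyRange st (-1) (-s)).foldl (fun acc2 dof =>
      acc2 ++ (if reverse_blocks then (pvBlockIdx sub_block_size dof).reverse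
               else pvBlockIdx sub_block_size dof)) acc) []
  -- dofs[i] : always in range inside Pre_ (pyGetD's default is never read there)
  perm.map (fun i => PySem.List.pyGetD dofs i 0)

def quadrilateral_reflection (dofs : List Int) (sub_block_size : Int) (reverse_blocks : Bool) : List Int :=
  let n := PySem.Int.floordiv (PySem.List.len dofs) sub_block_size
  let s := pvFloorSqrt n
  if s = 0 then dofs
  else
    let perm := (PySem.List.pyRange 0 s 1).foldl (fun acc st =>
      (PySem.List.pyRange st n s).foldl (fun acc2 dof =>
        acc2 ++ (if reverse_blocks then (pvBlockIdx sub_block_size dof).reverse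
                 else pvBlockIdx sub_block_size dof)) acc) []
    perm.map (fun i => PySem.List.pyGetD dofs i 0)

def permute_ncf_face (dofs_in : List Int) (sub_block_size : Int) (reverse_blocks : Bool) : List (List Int) :=
  let n := PySem.Int.floordiv (PySem.List.len dofs_in) sub_block_size
  let s := pvFloorSqrt n
  -- s ∉ {1,2}: Python raises RuntimeError (s > 2) or fails an assert — outside Pre_
  let simple_dofs : List Int := if s = 1 then [0] else if s = 2 then [0, 1, 2, 3] else []
  let dofs := simple_dofs.foldl (fun acc d =>
    acc ++ (PySem.List.pyRange 0 sub_block_size 1).map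
      (fun k => PySem.List.pyGetD dofs_in (d * sub_block_size + k) 0)) []
  [quadrilateral_rotation dofs sub_block_size false,
   quadrilateral_reflection dofs sub_block_size reverse_blocks]

-- ===== PORT B =====
def permute_ncf_face_alt (dofs_in : List Int) (sub_block_size : Int) (reverse_blocks : Bool) : List (List Int) :=
  let n := PySem.Int.floordiv (PySem.List.len dofs_in) sub_block_size
  if n = 1 ∨ n = 4 then
    let rot_order : List Int := if n = 1 then [0] else [2, 0, 3, 1]
    let refl_order : List Int := if n = 1 then [0] else [0, 2, 1, 3]
    let blocks := (PySem.List.pyRange 0 n 1).map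
      (fun i => PySem.List.slice dofs_in (some (i * sub_block_size)) (some ((i + 1) * sub_block_size)))
    let rotation := rot_order.flatMap (fun b => (PySem.List.pyGet? blocks b).getD [])
    let reflection := refl_order.flatMap (fun b =>
      let blk := (PySem.List.pyGet? blocks b).getD []
      if reverse_blocks then blk.reverse else blk)
    [rotation, reflection]
  else []  -- Python B raises RuntimeError here — outside Pre_

-- ===== PRECONDITION & SPEC =====
-- Pre_: exactly the inputs on which A returns normally; everywhere else A raises
-- (ZeroDivisionError for sub_block_size = 0, math domain error / AssertionError /
-- RuntimeError otherwise), so no input on which A returns is excluded.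
def Pre_permute_ncf_face (dofs_in : List Int) (sub_block_size : Int) (reverse_blocks : Bool) : Prop :=
  1 ≤ sub_block_size ∧
    ((dofs_in.length : Int) = sub_block_size ∨ (dofs_in.length : Int) = 4 * sub_block_size)
instance (dofs_in : List Int) (sub_block_size : Int) (reverse_blocks : Bool) : Decidable (Pre_permute_ncf_face dofs_in sub_block_size reverse_blocks) := by unfold Pre_permute_ncf_face; infer_instance

def pvWitness_permute_ncf_face : List Int × Int × Bool := ([1, 2, 3, 4], 1, true)

def Spec_permute_ncf_face (dofs_in : List Int) (sub_block_size : Int) (reverse_blocks : Bool) (out : List (List Int)) : Prop := out = permute_ncf_face_alt dofs_in sub_block_size reverse_blocks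
instance (dofs_in : List Int) (sub_block_size : Int) (reverse_blocks : Bool) (out : List (List Int)) : Decidable (Spec_permute_ncf_face dofs_in sub_block_size reverse_blocks out) := by unfold Spec_permute_ncf_face; infer_instance

-- ===== CLAIM (what is proved, stated in full; the proofs are below) =====
def Claim_equal_permute_ncf_face : Prop := ∀ (dofs_in : List Int) (sub_block_size : Int) (reverse_blocks : Bool), Dom_permute_ncf_face dofs_in sub_block_size reverse_blocks → Pre_permute_ncf_face dofs_in sub_block_size reverse_blocks → Spec_permute_ncf_face dofs_in sub_block_size reverse_blocks (permute_ncf_face dofs_in sub_block_size reverse_blocks)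

-- ===== LEMMAS AND PROOFS =====

-- A's block comprehension, read through the list: it is the d-th length-c slice.
theorem blockL (xs : List Int) (c d : Nat) (h : d*c + c ≤ xs.length) :
    (PySem.List.pyRange 0 (c:Int) 1).map (fun k => PySem.List.pyGetD xs ((d:Int)*(c:Int)+k) 0)
    = (xs.drop (d*c)).take c := by
  rw [PySem.List.pyRange_one]
  have h0 : ((c:Int) - 0).toNat = c := by omega
  rw [h0, List.map_map]
  apply List.ext_getElem
  · simp; omega
  · intro i h1 h2
    simp only [List.getElem_map, List.getElem_range, Function.comp_apply]
    have he : (d:Int)*(c:Int) + (0 + (i:Int)) = ((d*c + i : Nat):Int) := by push_cast; ring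
    have hi : d*c + i < xs.length := by simp at h1; omega
    rw [he, PySem.List.pyGetD_natCast, List.getD_eq_getElem _ _ hi,
        List.getElem_take, List.getElem_drop]

theorem blockGet (ys : List Int) (c : Nat) (d : Nat) (rb : Bool) (h : d*c + c ≤ ys.length) :
    ((if rb then (pvBlockIdx (c:Int) (d:Int)).reverse else pvBlockIdx (c:Int) (d:Int)).map
       (fun i => PySem.List.pyGetD ys i 0))
    = (if rb then ((ys.drop (d*c)).take c).reverse else (ys.drop (d*c)).take c) := by
  have base : (pvBlockIdx (c:Int) (d:Int)).map (fun i => PySem.List.pyGetD ys i 0)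
      = (ys.drop (d*c)).take c := by
    unfold pvBlockIdx
    rw [List.map_map]
    have := blockL ys c d h
    simpa [Function.comp] using this
  cases rb <;> simp [base]

theorem hn (c : Nat) (q : Nat) (hc : 1 ≤ c) :
    PySem.Int.floordiv ((q*c : Nat):Int) (c:Int) = (q:Int) := by
  rw [PySem.Int.floordiv_natCast, Nat.mul_div_cancel _ (by omega)]

theorem pvFloorSqrt_four : pvFloorSqrt 4 = 2 := by
  have h : Nat.sqrt 4 = 2 := by norm_num
  show ((Nat.sqrt 4 : Nat) : Int) = 2
  rw [h]; rfl

theorem hn4' (c : Nat) (hc : 1 ≤ c) :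
    PySem.Int.floordiv ((4*c:Nat):Int) ((c:Nat):Int) = 4 := by
  have := hn c 4 hc; exact_mod_cast this

def pvblk (ys : List Int) (c : Nat) (d : Nat) : List Int := (ys.drop (d*c)).take c
def pvblkR (ys : List Int) (c : Nat) (d : Nat) (rb : Bool) : List Int :=
  if rb then (pvblk ys c d).reverse else pvblk ys c d

theorem rot1 (ys : List Int) (c : Nat) (rb : Bool) (hc : 1 ≤ c) (hl : ys.length = c) :
    quadrilateral_rotation ys (c:Int) rb = pvblkR ys c 0 rb := by
  have hn1 : PySem.Int.floordiv ((c:Nat):Int) ((c:Nat):Int) = 1 := by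
    have := hn c 1 hc; rwa [one_mul] at this
  have e1 : PySem.List.pyRange (1 - pvFloorSqrt 1) 1 1 = [0] := by decide
  have e2 : PySem.List.pyRange 0 (-1) (-pvFloorSqrt 1) = [0] := by decide
  simp only [quadrilateral_rotation, PySem.List.len_eq, hl, hn1, e1, e2, List.foldl_cons,
    List.foldl_nil, List.nil_append]
  have := blockGet ys c 0 rb (by omega)
  simpa [pvblkR, pvblk] using this

theorem refl1 (ys : List Int) (c : Nat) (rb : Bool) (hc : 1 ≤ c) (hl : ys.length = c) :
    quadrilateral_reflection ys (c:Int) rb = pvblkR ys c 0 rb := by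
  have hn1 : PySem.Int.floordiv ((c:Nat):Int) ((c:Nat):Int) = 1 := by
    have := hn c 1 hc; rwa [one_mul] at this
  have e1 : PySem.List.pyRange 0 (pvFloorSqrt 1) 1 = [0] := by decide
  have e2 : PySem.List.pyRange 0 1 (pvFloorSqrt 1) = [0] := by decide
  have e0 : pvFloorSqrt 1 ≠ 0 := by decide
  simp only [quadrilateral_reflection, PySem.List.len_eq, hl, hn1, e1, e2, if_neg e0,
    List.foldl_cons, List.foldl_nil, List.nil_append]
  have := blockGet ys c 0 rb (by omega)
  simpa [pvblkR, pvblk] using this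

theorem rot4 (ys : List Int) (c : Nat) (rb : Bool) (hc : 1 ≤ c) (hl : ys.length = 4*c) :
    quadrilateral_rotation ys (c:Int) rb
      = pvblkR ys c 2 rb ++ pvblkR ys c 0 rb ++ pvblkR ys c 3 rb ++ pvblkR ys c 1 rb := by
  have e1 : PySem.List.pyRange (4 - 2) 4 1 = [2, 3] := by decide
  have e2 : PySem.List.pyRange 2 (-1) (-2) = [2, 0] := by decide
  have e3 : PySem.List.pyRange 3 (-1) (-2) = [3, 1] := by decide
  simp only [quadrilateral_rotation, PySem.List.len_eq, hl, hn4' c hc, pvFloorSqrt_four,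
    e1, e2, e3, List.foldl_cons, List.foldl_nil, List.nil_append, List.map_append]
  have b0 := blockGet ys c 0 rb (by omega)
  have b1 := blockGet ys c 1 rb (by omega)
  have b2 := blockGet ys c 2 rb (by omega)
  have b3 := blockGet ys c 3 rb (by omega)
  simp only [Nat.cast_ofNat, Nat.cast_zero, Nat.cast_one] at b0 b1 b2 b3
  simp [b0, b1, b2, b3, pvblkR, pvblk]

theorem refl4 (ys : List Int) (c : Nat) (rb : Bool) (hc : 1 ≤ c) (hl : ys.length = 4*c) :
    quadrilateral_reflection ys (c:Int) rb
      = pvblkR ys c 0 rb ++ pvblkR ys c 2 rb ++ pvblkR ys c 1 rb ++ pvblkR ys c 3 rb := by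
  have e0 : (2:Int) ≠ 0 := by decide
  have e1 : PySem.List.pyRange 0 2 1 = [0, 1] := by decide
  have e2 : PySem.List.pyRange 0 4 2 = [0, 2] := by decide
  have e3 : PySem.List.pyRange 1 4 2 = [1, 3] := by decide
  simp only [quadrilateral_reflection, PySem.List.len_eq, hl, hn4' c hc, pvFloorSqrt_four,
    if_neg e0, e1, e2, e3, List.foldl_cons, List.foldl_nil, List.nil_append, List.map_append]
  have b0 := blockGet ys c 0 rb (by omega)
  have b1 := blockGet ys c 1 rb (by omega)
  have b2 := blockGet ys c 2 rb (by omega)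
  have b3 := blockGet ys c 3 rb (by omega)
  simp only [Nat.cast_ofNat, Nat.cast_zero, Nat.cast_one] at b0 b1 b2 b3
  simp [b0, b1, b2, b3, pvblkR, pvblk]

theorem concat4 (xs : List Int) (c : Nat) (hl : xs.length = 4*c) :
    pvblk xs c 0 ++ (pvblk xs c 1 ++ (pvblk xs c 2 ++ pvblk xs c 3)) = xs := by
  have t3 : pvblk xs c 3 = xs.drop (3*c) := by
    simp only [pvblk]; rw [List.take_of_length_le (by simp [hl]; omega)]
  have step : ∀ d : Nat, pvblk xs c d ++ xs.drop ((d+1)*c) = xs.drop (d*c) := by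
    intro d
    simp only [pvblk]
    conv_rhs => rw [← List.take_append_drop c (xs.drop (d*c))]
    congr 1
    rw [List.drop_drop]
    congr 1
    ring
  have s2 := step 2; have s1 := step 1; have s0 := step 0
  norm_num at s2 s1 s0
  rw [t3, s2, s1, s0]

theorem sliceBlk (xs : List Int) (c d : Nat) :
    PySem.List.slice xs (some ((d:Int)*(c:Int))) (some (((d:Int)+1)*(c:Int))) = pvblk xs c d := by
  have h1 : ((d:Int)*(c:Int)) = ((d*c : Nat):Int) := by push_cast; ring
  have h2 : (((d:Int)+1)*(c:Int)) = ((d*c : Nat):Int) + ((c:Nat):Int) := by push_cast; ring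
  rw [h1, h2, PySem.List.slice_natCast_add]
  rfl

-- ===== VERDICT (by name: the statement is the Claim_ definition above) =====
theorem permute_ncf_face_spec : Claim_equal_permute_ncf_face := by
  intro xs sbs rb _ hpre
  obtain ⟨hs, hlen⟩ := hpre
  unfold Spec_permute_ncf_face
  obtain ⟨c, rfl⟩ : ∃ c : Nat, sbs = (c:Int) := ⟨sbs.toNat, by omega⟩
  have hc : 1 ≤ c := by exact_mod_cast hs
  rcases hlen with h | h
  · -- n = 1
    have hl : xs.length = c := by exact_mod_cast h
    have hn1 : PySem.Int.floordiv ((c:Nat):Int) ((c:Nat):Int) = 1 := by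
      have := hn c 1 hc; rwa [one_mul] at this
    have pv1 : pvFloorSqrt 1 = 1 := by decide
    have hd := blockL xs c 0 (by omega)
    simp only [Nat.cast_zero, zero_mul, zero_add, List.drop_zero] at hd
    rw [List.take_of_length_le (by omega)] at hd
    simp only [permute_ncf_face, permute_ncf_face_alt, PySem.List.len_eq, hl, hn1, pv1]
    norm_num [hd]
    constructor
    · rw [rot1 xs c false hc hl]; simp [pvblkR, pvblk]
    · rw [refl1 xs c rb hc hl]; cases rb <;> simp [pvblkR, pvblk]
  · -- n = 4
    have hl : xs.length = 4*c := by exact_mod_cast h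
    have hn4 : PySem.Int.floordiv ((4*c:Nat):Int) ((c:Nat):Int) = 4 := hn4' c hc
    have m0 := blockL xs c 0 (by omega)
    have m1 := blockL xs c 1 (by omega)
    have m2 := blockL xs c 2 (by omega)
    have m3 := blockL xs c 3 (by omega)
    have s0 := sliceBlk xs c 0
    have s1 := sliceBlk xs c 1
    have s2 := sliceBlk xs c 2
    have s3 := sliceBlk xs c 3
    norm_num [pvblk] at m0 m1 m2 m3 s0 s1 s2 s3
    have hcat := concat4 xs c hl
    have e4 : PySem.List.pyRange 0 4 1 = [0, 1, 2, 3] := by decide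
    simp only [permute_ncf_face, permute_ncf_face_alt, PySem.List.len_eq, hl, hn4,
      pvFloorSqrt_four, e4, List.map_cons, List.map_nil]
    have t2 : Int.toNat 2 = 2 := rfl
    have t3 : Int.toNat 3 = 3 := rfl
    norm_num [m0, m1, m2, m3, s0, s1, s2, s3, t2, t3]
    have hcat' : List.take c xs ++ (List.take c (List.drop c xs) ++
        (List.take c (List.drop (2*c) xs) ++ List.take c (List.drop (3*c) xs))) = xs := by
      simpa [pvblk] using hcat
    rw [hcat']
    constructor
    · rw [rot4 xs c false hc hl]; simp [pvblkR, pvblk, List.append_assoc]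
    · rw [refl4 xs c rb hc hl]; cases rb <;> simp [pvblkR, pvblk, List.append_assoc]
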